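-- pv_equiv track=rewrite | github.com/kdairatchi/liffy | liffy_ultimate_unified.py | _check_xss_parameters
-- ===== SOURCE A (Python) =====
-- from typing import List, Dict, Optional, Any, Tuple
--
-- def _check_xss_parameters(parameters: Dict[str, List[str]]) -> bool:
--     """Check if parameters might be vulnerable to XSS"""
--     xss_keywords = [
--         'search', 'query', 'q', 'term', 'keyword', 'name', 'title',
--         'description', 'comment', 'message', 'text', 'input', 'value'
--     ]
--
--     for param_name in parameters.keys():
--         if any(keyword in param_name.lower() for keyword in xss_keywords):
--             return True
--
--     return False
-- ===== SOURCE B (Python) =====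
-- def _check_xss_parameters(parameters):
--     """Check if parameters might be vulnerable to XSS.
--
--     Multi-pattern matcher: each lowercased name is scanned once left to
--     right; at every position we test whether any keyword starts there,
--     instead of running a separate substring search per keyword.
--     """
--     xss_keywords = [
--         'search', 'query', 'q', 'term', 'keyword', 'name', 'title',
--         'description', 'comment', 'message', 'text', 'input', 'value'
--     ]
--
--     for param_name in parameters:
--         lname = param_name.lower()
--         for i in range(len(lname) + 1):
--             if any(lname.startswith(kw, i) for kw in xss_keywords):
--                 return True
--     return False
-- ===== Notes on version B (the rewrite author's own statement) =====
-- stated objective: alternative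
-- what changed: Per-keyword substring searches (one 'in' scan per keyword) are replaced by a single left-to-right scan of each lowercased name that tests all keywords anchored at each position (naive multi-pattern matcher).
import Mathlib
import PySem

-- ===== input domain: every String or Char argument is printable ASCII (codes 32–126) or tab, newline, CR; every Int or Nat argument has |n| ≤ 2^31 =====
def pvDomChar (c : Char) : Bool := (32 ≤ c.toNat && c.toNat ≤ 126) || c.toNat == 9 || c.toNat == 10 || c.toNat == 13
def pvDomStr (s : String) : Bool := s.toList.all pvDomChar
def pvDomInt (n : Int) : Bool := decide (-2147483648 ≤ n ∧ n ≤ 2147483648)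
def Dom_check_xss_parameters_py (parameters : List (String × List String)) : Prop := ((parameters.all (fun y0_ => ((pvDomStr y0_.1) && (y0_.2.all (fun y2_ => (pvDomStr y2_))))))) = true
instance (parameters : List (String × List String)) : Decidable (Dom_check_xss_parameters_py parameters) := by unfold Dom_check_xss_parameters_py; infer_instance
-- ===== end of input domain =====

-- B replaces A's per-keyword substring searches with a single position scan of each lowercased name testing all keywords anchored at each position (alternative algorithm, same cost class).


-- ===== PORT A =====
-- keywords of A (Python string literals)
def pvKws : List String :=
  ["search", "query", "q", "term", "keyword", "name", "title",
   "description", "comment", "message", "text", "input", "value"]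

-- for param_name in parameters.keys(): if any(keyword in param_name.lower() for keyword in xss_keywords): return True
def check_xss_parameters_py (parameters : List (String × List String)) : Bool :=
  parameters.any (fun p => pvKws.any (fun kw => PySem.Str.isIn kw (PySem.Str.lower p.1)))

-- ===== PORT B =====
-- same keywords, as character lists (B scans names character-position by position)
def pvKwsB : List (List Char) := pvKws.map String.toList

-- Source B: lname = param_name.lower(); for i in range(len(lname)+1): if any(lname.startswith(kw, i) ...): return True
-- lname.startswith(kw, i) is ported as Chars.startswith (l.drop i) kw — exact for the 0 ≤ i ≤ len(lname) that range produces.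
def check_xss_parameters_py_alt (parameters : List (String × List String)) : Bool :=
  parameters.any (fun p =>
    let l := (PySem.Str.lower p.1).toList
    (List.range (l.length + 1)).any (fun i =>
      pvKwsB.any (fun kw => PySem.Chars.startswith (l.drop i) kw)))

-- ===== PRECONDITION & SPEC =====
def Spec_check_xss_parameters_py (parameters : List (String × List String)) (out : Bool) : Prop := out = check_xss_parameters_py_alt parameters
instance (parameters : List (String × List String)) (out : Bool) : Decidable (Spec_check_xss_parameters_py parameters out) := by unfold Spec_check_xss_parameters_py; infer_instance

-- ===== CLAIM (what is proved, stated in full; the proofs are below) =====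
def Claim_equal_check_xss_parameters_py : Prop := ∀ (parameters : List (String × List String)), Dom_check_xss_parameters_py parameters → Spec_check_xss_parameters_py parameters (check_xss_parameters_py parameters)

-- ===== LEMMAS AND PROOFS =====

-- any j with kw <+: l.drop j can be clamped into range (l.length + 1)
theorem pv_drop_bound (l p : List Char) :
    (∃ j, p <+: l.drop j) ↔ (∃ i < l.length + 1, p <+: l.drop i) := by
  constructor
  · rintro ⟨j, hj⟩
    refine ⟨min j l.length, by omega, ?_⟩
    rcases le_or_gt j l.length with h | h
    · simpa [Nat.min_eq_left h] using hj
    · have hnil : l.drop j = [] := List.drop_eq_nil_of_le (by omega)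
      have : l.drop (min j l.length) = [] :=
        List.drop_eq_nil_of_le (by omega)
      rw [this]; rw [hnil] at hj; exact hj
  · rintro ⟨i, _, hi⟩; exact ⟨i, hi⟩

-- one name: A's per-keyword substring tests = B's position scan
theorem pv_per_name (s : String) :
    (pvKws.any (fun kw => PySem.Str.isIn kw (PySem.Str.lower s)))
      = (let l := (PySem.Str.lower s).toList
         (List.range (l.length + 1)).any (fun i =>
           pvKwsB.any (fun kw => PySem.Chars.startswith (l.drop i) kw))) := by
  set l := (PySem.Str.lower s).toList with hl
  rw [Bool.eq_iff_iff]
  simp only [List.any_eq_true, List.mem_range, pvKwsB, List.mem_map]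
  constructor
  · rintro ⟨kw, hkw, hin⟩
    have : PySem.Chars.isIn kw.toList l = true := by
      simpa [PySem.Str.isIn, hl] using hin
    obtain ⟨j, hj⟩ := (PySem.Chars.exists_prefix_drop_iff_isIn kw.toList l).mpr this
    obtain ⟨i, hi, hp⟩ := (pv_drop_bound l kw.toList).mp ⟨j, hj⟩
    exact ⟨i, hi, kw.toList, ⟨kw, hkw, rfl⟩, (PySem.Chars.startswith_iff _ _).mpr hp⟩
  · rintro ⟨i, hi, kwl, ⟨kw, hkw, rfl⟩, hs⟩
    have hp := (PySem.Chars.startswith_iff _ _).mp hs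
    have hin : PySem.Chars.isIn kw.toList l = true :=
      (PySem.Chars.exists_prefix_drop_iff_isIn kw.toList l).mp ⟨i, hp⟩
    exact ⟨kw, hkw, by simpa [PySem.Str.isIn, hl] using hin⟩


-- ===== VERDICT (by name: the statement is the Claim_ definition above) =====
theorem check_xss_parameters_py_spec : Claim_equal_check_xss_parameters_py := by
  intro parameters _
  unfold Spec_check_xss_parameters_py check_xss_parameters_py check_xss_parameters_py_alt
  exact List.any_congr rfl (fun p => pv_per_name p.1)
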